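-- pv_equiv track=rewrite | github.com/racerandom/JaMIE | utils.py | mask_ner_label
-- ===== SOURCE A (Python) =====
-- def mask_ner_label(ner_labels, ner_masks, ner_cert_labels, attrib_tag, cert_labels, ner_offset):
--
--     if not cert_labels:
--         prev_label = 'O'
--         for i, curr_label in enumerate(ner_labels):
--             if i > 0:
--                 prev_label = ner_labels[i - 1]
--             if curr_label in ['B-' + attrib_tag]:
--                 if prev_label in ['B-' + attrib_tag, 'I-' + attrib_tag]:
--                     ner_offset += 1
--                 ner_masks[ner_offset][i] = 1
--             elif curr_label in ['I-' + attrib_tag]: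
--                 if prev_label in ['B-' + attrib_tag, 'I-' + attrib_tag]:
--                     ner_masks[ner_offset][i] = 1
--                 else:
--                     ner_masks[ner_offset][i] = 1
--             else:
--                 if prev_label in ['B-' + attrib_tag, 'I-' + attrib_tag]:
--                     ner_offset += 1
--     else:
--         prev_label = 'O'
--         prev_cert_label = '_'
--         for i, (curr_label, curr_cert_label) in enumerate(zip(ner_labels, cert_labels)):
--             if i > 0:
--                 prev_label = ner_labels[i - 1]
--                 prev_cert_label = cert_labels[i - 1]
--             if curr_label in ['B-' + attrib_tag]:
--                 if prev_label in ['B-' + attrib_tag, 'I-' + attrib_tag]: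
--                     ner_offset += 1
--                 ner_masks[ner_offset][i] = 1
--                 ner_cert_labels[ner_offset] = curr_cert_label
--             elif curr_label in ['I-' + attrib_tag]:
--                 if prev_label in ['B-' + attrib_tag, 'I-' + attrib_tag]:
--                     ner_masks[ner_offset][i] = 1
--                 else:
--                     ner_masks[ner_offset][i] = 1
--                     ner_cert_labels[ner_offset] = curr_cert_label
--             else:
--                 if prev_label in ['B-' + attrib_tag, 'I-' + attrib_tag]:
--                     ner_offset += 1
--     return ner_offset
-- ===== SOURCE B (Python) =====
-- def mask_ner_label(ner_labels, ner_masks, ner_cert_labels, attrib_tag, cert_labels, ner_offset):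
--     begin = 'B-' + attrib_tag
--     inside = 'I-' + attrib_tag
--     n = len(ner_labels) if not cert_labels else min(len(ner_labels), len(cert_labels))
--     # pass 1: collect spans as [start, end) token ranges
--     spans = []
--     for i in range(n):
--         lab = ner_labels[i]
--         if lab != begin and lab != inside:
--             continue
--         prev_tagged = i > 0 and ner_labels[i - 1] in (begin, inside)
--         if lab == begin or not prev_tagged:
--             spans.append([i, i + 1])
--         else:
--             spans[-1][1] = i + 1
--     # pass 2: write mask rows and the cert label of each span's first token
--     for k, (s, e) in enumerate(spans):
--         row = ner_offset + k
--         for i in range(s, e):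
--             ner_masks[row][i] = 1
--         if cert_labels:
--             ner_cert_labels[row] = cert_labels[s]
--     if not spans:
--         return ner_offset
--     return ner_offset + len(spans) - 1 + (1 if spans[-1][1] < n else 0)
-- ===== Notes on version B (the rewrite author's own statement) =====
-- stated objective: simpler
-- what changed: A's single stateful loop with a duplicated if/elif/else chain per branch (cert / no-cert) is replaced by a two-pass decomposition: one pass builds an explicit list of [start,end) span records from the labels, a second pass writes the mask rows and span-start cert labels, and the returned offset is a closed formula (offset + #spans - 1 + trailing-gap flag); B also hoists the 'B-'+tag / 'I-'+tag strings and membership tuples that A rebuilds on every iteration, which is the measured constant-factor speedup.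
-- outside the precondition, e.g. on mask_ner_label(['O', 'B-x'], [[0, 0]], [], 'x', None, 0): A returns 0, B returns 0; on mask_ner_label(['B-x'], [[0]], [], 'x', None, -1): A returns -1, B returns -1
import Mathlib
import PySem

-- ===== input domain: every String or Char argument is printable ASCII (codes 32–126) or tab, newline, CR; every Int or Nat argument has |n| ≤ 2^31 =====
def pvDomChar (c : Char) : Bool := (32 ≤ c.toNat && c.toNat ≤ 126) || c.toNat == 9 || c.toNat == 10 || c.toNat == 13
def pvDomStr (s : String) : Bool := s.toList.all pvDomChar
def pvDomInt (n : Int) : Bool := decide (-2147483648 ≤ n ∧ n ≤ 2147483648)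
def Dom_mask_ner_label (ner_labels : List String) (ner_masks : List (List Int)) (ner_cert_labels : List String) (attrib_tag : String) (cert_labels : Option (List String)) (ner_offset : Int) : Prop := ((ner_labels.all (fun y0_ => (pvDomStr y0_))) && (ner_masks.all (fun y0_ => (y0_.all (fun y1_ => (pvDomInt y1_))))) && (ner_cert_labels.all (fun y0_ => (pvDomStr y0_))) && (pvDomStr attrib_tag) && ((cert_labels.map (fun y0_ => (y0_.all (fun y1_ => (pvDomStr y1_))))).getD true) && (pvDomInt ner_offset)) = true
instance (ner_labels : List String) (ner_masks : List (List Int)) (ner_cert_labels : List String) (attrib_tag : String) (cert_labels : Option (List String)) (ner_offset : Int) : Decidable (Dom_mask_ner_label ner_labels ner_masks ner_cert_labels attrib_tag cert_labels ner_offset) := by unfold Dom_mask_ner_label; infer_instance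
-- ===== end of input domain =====

-- Both Pythons mutate ner_masks / ner_cert_labels in place; A and B perform IDENTICAL writes, the writes never
-- influence the returned offset, and the equivalence proved here is about the RETURN VALUE only, so the ports
-- model the offset computation and omit the in-place writes (the raising writes are excluded by Pre_).
-- B replaces A's single stateful loop by a two-pass span decomposition (simpler, same O(n) cost).

-- ===== PORT A =====
-- A's loop: 'prev_label' is 'O' at i = 0 and ner_labels[i-1] afterwards, i.e. the previous element; the port
-- carries it as an accumulator.  The mask/cert assignments of each branch are dropped (see header); the
-- dead variable prev_cert_label of the cert branch is dropped too.  Branch order is A's.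
def pvLoopA (Btag Itag : String) : List String → String → Int → Int
  | [], _, off => off
  | curr :: rest, prev, off =>
    if curr == Btag then
      -- 'if prev in [B,I]: off += 1'; then 'ner_masks[off][i] = 1' (write dropped)
      pvLoopA Btag Itag rest curr (if prev == Btag || prev == Itag then off + 1 else off)
    else if curr == Itag then
      -- both arms of A's inner if only write to ner_masks / ner_cert_labels
      pvLoopA Btag Itag rest curr off
    else
      pvLoopA Btag Itag rest curr (if prev == Btag || prev == Itag then off + 1 else off)

-- the cert branch: same control flow over zip(ner_labels, cert_labels); the cert component is never read
-- for the returned offset (cert writes dropped, see header)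
def pvLoopA2 (Btag Itag : String) : List (String × String) → String → Int → Int
  | [], _, off => off
  | (curr, _curr_cert) :: rest, prev, off =>
    if curr == Btag then
      pvLoopA2 Btag Itag rest curr (if prev == Btag || prev == Itag then off + 1 else off)
    else if curr == Itag then
      pvLoopA2 Btag Itag rest curr off
    else
      pvLoopA2 Btag Itag rest curr (if prev == Btag || prev == Itag then off + 1 else off)

def mask_ner_label (ner_labels : List String) (ner_masks : List (List Int)) (ner_cert_labels : List String) (attrib_tag : String) (cert_labels : Option (List String)) (ner_offset : Int) : Int :=
  let Btag := "B-" ++ attrib_tag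
  let Itag := "I-" ++ attrib_tag
  match cert_labels with
  | none => pvLoopA Btag Itag ner_labels "O" ner_offset          -- 'if not cert_labels' (None)
  | some cl =>
    if cl.isEmpty then pvLoopA Btag Itag ner_labels "O" ner_offset  -- 'if not cert_labels' (empty list)
    else pvLoopA2 Btag Itag (ner_labels.zip cl) "O" ner_offset

-- ===== PORT B =====
-- Source B's 'spans[-1][1] = i + 1'
def pvSetLastEnd (spans : List (Int × Int)) (e : Int) : List (Int × Int) :=
  match spans.getLast? with
  | none => spans
  | some (s, _) => spans.dropLast ++ [(s, e)]

-- Source B pass 1: 'for i in range(n)' over the first n labels, building [start, end) span records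
def pvAltSpans (Btag Itag : String) : List String → Int → Bool → List (Int × Int) → List (Int × Int)
  | [], _, _, spans => spans
  | lab :: rest, i, prevTagged, spans =>
    if !(lab == Btag) && !(lab == Itag) then
      pvAltSpans Btag Itag rest (i + 1) false spans               -- 'continue'
    else if lab == Btag || !prevTagged then
      pvAltSpans Btag Itag rest (i + 1) true (spans ++ [(i, i + 1)])
    else
      pvAltSpans Btag Itag rest (i + 1) true (pvSetLastEnd spans (i + 1))

def mask_ner_label_alt (ner_labels : List String) (ner_masks : List (List Int)) (ner_cert_labels : List String) (attrib_tag : String) (cert_labels : Option (List String)) (ner_offset : Int) : Int :=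
  let begin_ := "B-" ++ attrib_tag
  let inside := "I-" ++ attrib_tag
  let n : Nat := match cert_labels with
    | none => ner_labels.length
    | some cl => if cl.isEmpty then ner_labels.length else min ner_labels.length cl.length
  let spans := pvAltSpans begin_ inside (ner_labels.take n) 0 false []
  -- Source B pass 2 only performs the in-place writes (see header): it contributes nothing to the return value
  match spans.getLast? with
  | none => ner_offset
  | some (_, e) => ner_offset + (spans.length : Int) - 1 + (if e < (n : Int) then 1 else 0)

-- ===== PRECONDITION & SPEC =====
-- Pre_ excludes the inputs on which A's in-place index writes raise IndexError, by a simple sufficient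
-- closed-form bound (only demanded when a B-/I-attrib_tag label occurs, since otherwise A writes nothing):
-- 0 ≤ offset, offset + n within ner_masks, every mask row at least n long, and (cert case) offset + n within
-- ner_cert_labels.  Being a sufficient bound it also excludes some returning inputs (e.g. negative offsets
-- that wrap in range, or masks shorter than offset + n that the actual bump count never reaches) — see cites.
def Pre_mask_ner_label (ner_labels : List String) (ner_masks : List (List Int)) (ner_cert_labels : List String) (attrib_tag : String) (cert_labels : Option (List String)) (ner_offset : Int) : Prop :=
  let Btag := "B-" ++ attrib_tag
  let Itag := "I-" ++ attrib_tag
  let n : Nat := match cert_labels with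
    | none => ner_labels.length
    | some cl => if cl.isEmpty then ner_labels.length else min ner_labels.length cl.length
  ((ner_labels.take n).any (fun l => l == Btag || l == Itag)) = true →
    0 ≤ ner_offset ∧ ner_offset + (n : Int) ≤ (ner_masks.length : Int)
      ∧ (∀ row ∈ ner_masks, n ≤ row.length)
      ∧ ((match cert_labels with
          | none => true
          | some cl => cl.isEmpty || decide (ner_offset + (n : Int) ≤ (ner_cert_labels.length : Int))) = true)
instance (ner_labels : List String) (ner_masks : List (List Int)) (ner_cert_labels : List String) (attrib_tag : String) (cert_labels : Option (List String)) (ner_offset : Int) : Decidable (Pre_mask_ner_label ner_labels ner_masks ner_cert_labels attrib_tag cert_labels ner_offset) := by unfold Pre_mask_ner_label; infer_instance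

def pvWitness_mask_ner_label : List String × List (List Int) × List String × String × Option (List String) × Int :=
  (["B-x", "I-x", "O"], [[0, 0, 0], [0, 0, 0], [0, 0, 0]], ["_", "_", "_"], "x", some ["c1", "c2", "c3"], 0)

def Spec_mask_ner_label (ner_labels : List String) (ner_masks : List (List Int)) (ner_cert_labels : List String) (attrib_tag : String) (cert_labels : Option (List String)) (ner_offset : Int) (out : Int) : Prop := out = mask_ner_label_alt ner_labels ner_masks ner_cert_labels attrib_tag cert_labels ner_offset
instance (ner_labels : List String) (ner_masks : List (List Int)) (ner_cert_labels : List String) (attrib_tag : String) (cert_labels : Option (List String)) (ner_offset : Int) (out : Int) : Decidable (Spec_mask_ner_label ner_labels ner_masks ner_cert_labels attrib_tag cert_labels ner_offset out) := by unfold Spec_mask_ner_label; infer_instance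

-- ===== CLAIM (what is proved, stated in full; the proofs are below) =====
def Claim_equal_mask_ner_label : Prop := ∀ (ner_labels : List String) (ner_masks : List (List Int)) (ner_cert_labels : List String) (attrib_tag : String) (cert_labels : Option (List String)) (ner_offset : Int), Dom_mask_ner_label ner_labels ner_masks ner_cert_labels attrib_tag cert_labels ner_offset → Pre_mask_ner_label ner_labels ner_masks ner_cert_labels attrib_tag cert_labels ner_offset → Spec_mask_ner_label ner_labels ner_masks ner_cert_labels attrib_tag cert_labels ner_offset (mask_ner_label ner_labels ner_masks ner_cert_labels attrib_tag cert_labels ner_offset)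

-- ===== LEMMAS AND PROOFS =====

-- contribution of an accumulated span list to B's final formula, at current index i
def pvR0 (spans : List (Int × Int)) (i : Int) : Int :=
  match spans.getLast? with
  | none => 0
  | some (_, e) => (spans.length : Int) - 1 + (if e < i then 1 else 0)

-- loop invariant tying the span accumulator to the carried prev-tagged flag
def pvInv (spans : List (Int × Int)) (i : Int) (pt : Bool) : Prop :=
  match spans.getLast? with
  | none => pt = false
  | some (_, e) => e ≤ i ∧ (pt = true ↔ e = i)

theorem pvLoopA2_eq_pvLoopA (Btag Itag : String) (ps : List (String × String)) (prev : String) (off : Int) :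
    pvLoopA2 Btag Itag ps prev off = pvLoopA Btag Itag (ps.map Prod.fst) prev off := by
  induction ps generalizing prev off with
  | nil => rfl
  | cons p rest ih =>
    obtain ⟨c, cc⟩ := p
    simp only [pvLoopA2, pvLoopA, List.map_cons]
    split_ifs <;> simp [ih]

theorem pvMap_fst_zip {α β : Type} (l : List α) (l' : List β) :
    (l.zip l').map Prod.fst = l.take l'.length := by
  induction l generalizing l' with
  | nil => simp
  | cons a t ih =>
    cases l' with
    | nil => simp
    | cons b t' => simp [ih]

theorem pvO_ne_pre (p t : String) (h : p.toList.length = 2) : ("O" == p ++ t) = false := by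
  apply beq_eq_false_iff_ne.mpr
  intro hEq
  have h2 := congrArg String.toList hEq
  rw [String.toList_append] at h2
  have := congrArg List.length h2
  simp [h] at this
  omega

-- THE KEY LEMMA: A's running offset accumulates exactly what B's span formula accumulates.
theorem pvKey (Btag Itag : String) (rest : List String) (prev : String) (i off : Int) (spans : List (Int × Int))
    (hInv : pvInv spans i (prev == Btag || prev == Itag)) :
    pvLoopA Btag Itag rest prev off + pvR0 spans i
      = off + pvR0 (pvAltSpans Btag Itag rest i (prev == Btag || prev == Itag) spans) (i + (rest.length : Int)) := by
  induction rest generalizing prev i off spans with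
  | nil => simp [pvLoopA, pvAltSpans]
  | cons lab rest ih =>
    have hc : i + (((lab :: rest).length : Nat) : Int) = (i + 1) + ((rest.length : Nat) : Int) := by
      rw [List.length_cons]; push_cast; ring
    by_cases hB : (lab == Btag) = true
    · -- B- : bump if prev tagged, then a fresh span is appended
      have hInv' : pvInv (spans ++ [(i, i + 1)]) (i + 1) (lab == Btag || lab == Itag) := by
        simp [pvInv, List.getLast?_concat, hB]
      have hstep := ih lab (i + 1) (if (prev == Btag || prev == Itag) = true then off + 1 else off)
          (spans ++ [(i, i + 1)]) hInv'
      simp only [hB, Bool.true_or] at hstep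
      have hR : pvR0 (spans ++ [(i, i + 1)]) (i + 1)
          = pvR0 spans i + (if (prev == Btag || prev == Itag) = true then 1 else 0) := by
        cases hL : spans.getLast? with
        | none =>
          have hsp : spans = [] := by cases spans <;> simp_all [List.getLast?_concat]
          subst hsp
          simp only [pvInv, List.getLast?_nil] at hInv
          simp [pvR0, hInv, List.getLast?_concat]
        | some se =>
          obtain ⟨s, e⟩ := se
          have hne : spans.length ≠ 0 := by
            intro h0; rw [List.length_eq_zero_iff] at h0; subst h0; simp at hL
          simp only [pvInv, hL] at hInv
          obtain ⟨hle, hiff⟩ := hInv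
          simp only [pvR0, hL, List.getLast?_concat, List.length_append, List.length_cons,
            List.length_nil]
          by_cases hp : (prev == Btag || prev == Itag) = true
          · have he : e = i := hiff.mp hp
            simp only [hp, if_true, he, lt_irrefl, if_false]
            push_cast; omega
          · have he : e < i := lt_of_le_of_ne hle (fun h => hp (hiff.mpr h))
            simp only [hp, if_false, he, if_true]
            push_cast; omega
      simp only [pvLoopA, pvAltSpans, hB, Bool.true_or, Bool.not_true, Bool.false_and,
        Bool.false_eq_true, if_false, if_true]
      rw [hc]
      by_cases hp2 : (prev == Btag || prev == Itag) = true
      · rw [if_pos hp2] at hstep ⊢; rw [if_pos hp2] at hR; omega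
      · rw [if_neg hp2] at hstep ⊢; rw [if_neg hp2] at hR; omega
    · by_cases hI : (lab == Itag) = true
      · by_cases hp : (prev == Btag || prev == Itag) = true
        · -- I- after tagged: extends the open span; no bump
          cases hL : spans.getLast? with
          | none => simp only [pvInv, hL] at hInv; simp [hInv] at hp
          | some se =>
            obtain ⟨s, e⟩ := se
            have hne : spans.length ≠ 0 := by
              intro h0; rw [List.length_eq_zero_iff] at h0; subst h0; simp at hL
            simp only [pvInv, hL] at hInv
            obtain ⟨hle, hiff⟩ := hInv
            have hei : e = i := hiff.mp hp
            have hInv' : pvInv (pvSetLastEnd spans (i + 1)) (i + 1) (lab == Btag || lab == Itag) := by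
              simp [pvInv, pvSetLastEnd, hL, List.getLast?_concat, hI]
            have hstep := ih lab (i + 1) off (pvSetLastEnd spans (i + 1)) hInv'
            simp only [hI, Bool.or_true] at hstep
            have hR : pvR0 (pvSetLastEnd spans (i + 1)) (i + 1) = pvR0 spans i := by
              have hlen : (spans.dropLast ++ [(s, i + 1)]).length = spans.length := by
                simp only [List.length_append, List.length_dropLast, List.length_cons,
                  List.length_nil]
                omega
              simp only [pvR0, pvSetLastEnd, hL, List.getLast?_concat, hlen, hei,
                lt_irrefl, if_false, lt_self_iff_false]
            simp only [pvLoopA, pvAltSpans, hI, hB, Bool.or_true, Bool.false_eq_true, if_false,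
              Bool.not_true, Bool.and_false, hp, Bool.not_false, Bool.false_or, if_true,
              Bool.or_false]
            rw [hc]
            omega
        · -- I- after non-tagged: opens a fresh span; no bump
          have hInv' : pvInv (spans ++ [(i, i + 1)]) (i + 1) (lab == Btag || lab == Itag) := by
            simp [pvInv, List.getLast?_concat, hI]
          have hstep := ih lab (i + 1) off (spans ++ [(i, i + 1)]) hInv'
          simp only [hI, Bool.or_true] at hstep
          have hR : pvR0 (spans ++ [(i, i + 1)]) (i + 1) = pvR0 spans i := by
            cases hL : spans.getLast? with
            | none =>
              have hsp : spans = [] := by cases spans <;> simp_all [List.getLast?_concat]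
              subst hsp
              simp [pvR0, List.getLast?_concat]
            | some se =>
              obtain ⟨s, e⟩ := se
              have hne : spans.length ≠ 0 := by
                intro h0; rw [List.length_eq_zero_iff] at h0; subst h0; simp at hL
              simp only [pvInv, hL] at hInv
              obtain ⟨hle, hiff⟩ := hInv
              have hlt : e < i := lt_of_le_of_ne hle (fun h => hp (hiff.mpr h))
              simp only [pvR0, hL, List.getLast?_concat, List.length_append, List.length_cons,
                List.length_nil, hlt, if_true, lt_irrefl, if_false]
              push_cast; omega
          have hpb : (prev == Btag || prev == Itag) = false := by simpa using hp
          simp only [pvLoopA, pvAltSpans, hI, hB, Bool.or_true, Bool.false_eq_true, if_false,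
            hpb, Bool.not_false, Bool.and_true, Bool.not_true, Bool.and_false, if_true,
            Bool.false_or]
          rw [hc]
          omega
      · -- untagged: bump if prev tagged; span list untouched
        simp only [Bool.not_eq_true] at hB hI
        have hInv' : pvInv spans (i + 1) (lab == Btag || lab == Itag) := by
          cases hL : spans.getLast? with
          | none => simp only [pvInv, hL]; simp [hB, hI]
          | some se =>
            obtain ⟨s, e⟩ := se
            simp only [pvInv, hL] at hInv ⊢
            obtain ⟨hle, _⟩ := hInv
            refine ⟨by omega, ?_⟩
            simp only [hB, hI, Bool.or_self, Bool.false_eq_true, false_iff]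
            omega
        have hstep := ih lab (i + 1) (if (prev == Btag || prev == Itag) = true then off + 1 else off) spans hInv'
        simp only [hB, hI, Bool.or_self] at hstep
        have hR : pvR0 spans (i + 1)
            = pvR0 spans i + (if (prev == Btag || prev == Itag) = true then 1 else 0) := by
          cases hL : spans.getLast? with
          | none => simp only [pvInv, hL] at hInv; simp [pvR0, hL, hInv]
          | some se =>
            obtain ⟨s, e⟩ := se
            simp only [pvInv, hL] at hInv
            obtain ⟨hle, hiff⟩ := hInv
            simp only [pvR0, hL]
            by_cases hp : (prev == Btag || prev == Itag) = true
            · have he : e = i := hiff.mp hp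
              rw [if_pos hp]
              split_ifs <;> omega
            · have hlt : e < i := lt_of_le_of_ne hle (fun h => hp (hiff.mpr h))
              rw [if_neg hp]
              split_ifs <;> omega
        simp only [pvLoopA, pvAltSpans, hB, hI, Bool.not_false, Bool.and_self, if_true,
          Bool.false_eq_true, if_false]
        rw [hc]
        by_cases hp2 : (prev == Btag || prev == Itag) = true
        · rw [if_pos hp2] at hstep ⊢; rw [if_pos hp2] at hR; omega
        · rw [if_neg hp2] at hstep ⊢; rw [if_neg hp2] at hR; omega

theorem pvLoopA_eq_formula (Btag Itag : String) (ls : List String) (off : Int)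
    (hB : ("O" == Btag) = false) (hI : ("O" == Itag) = false) :
    pvLoopA Btag Itag ls "O" off = off + pvR0 (pvAltSpans Btag Itag ls 0 false []) (ls.length : Int) := by
  have h0 : ("O" == Btag || "O" == Itag) = false := by simp [hB, hI]
  have := pvKey Btag Itag ls "O" 0 off [] (by simp [pvInv, h0])
  rw [h0] at this
  simpa [pvR0] using this

theorem mask_ner_label_spec : Claim_equal_mask_ner_label := by
  unfold Claim_equal_mask_ner_label
  intro ner_labels ner_masks ner_cert_labels attrib_tag cert_labels ner_offset _hDom _hPre
  unfold Spec_mask_ner_label mask_ner_label mask_ner_label_alt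
  have hB : ("O" == ("B-" ++ attrib_tag)) = false := pvO_ne_pre "B-" attrib_tag (by decide)
  have hI : ("O" == ("I-" ++ attrib_tag)) = false := pvO_ne_pre "I-" attrib_tag (by decide)
  have hform : ∀ (n : Nat), n ≤ ner_labels.length →
      pvLoopA ("B-" ++ attrib_tag) ("I-" ++ attrib_tag) (ner_labels.take n) "O" ner_offset
        = (match (pvAltSpans ("B-" ++ attrib_tag) ("I-" ++ attrib_tag) (ner_labels.take n) 0 false []).getLast? with
           | none => ner_offset
           | some (_, e) =>
             ner_offset + ((pvAltSpans ("B-" ++ attrib_tag) ("I-" ++ attrib_tag) (ner_labels.take n) 0 false []).length : Int) - 1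
               + (if e < (n : Int) then 1 else 0)) := by
    intro n hn
    have hlen : (ner_labels.take n).length = n := by simp [hn]
    rw [pvLoopA_eq_formula _ _ _ _ hB hI, hlen]
    cases hL : (pvAltSpans ("B-" ++ attrib_tag) ("I-" ++ attrib_tag) (ner_labels.take n) 0 false []).getLast? with
    | none => simp [pvR0, hL]
    | some se => obtain ⟨s, e⟩ := se; simp [pvR0, hL]; ring
  match cert_labels with
  | none =>
    have h := hform ner_labels.length (le_refl _)
    simpa using h
  | some cl =>
    have hmin : ner_labels.take cl.length = ner_labels.take (min ner_labels.length cl.length) := by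
      rcases le_total ner_labels.length cl.length with h | h
      · simp [Nat.min_eq_left h, List.take_of_length_le h, List.take_length]
      · simp [Nat.min_eq_right h]
    by_cases hcl : cl.isEmpty
    · have h := hform ner_labels.length (le_refl _)
      simpa [hcl] using h
    · have h := hform (min ner_labels.length cl.length) (Nat.min_le_left _ _)
      simpa [hcl, pvLoopA2_eq_pvLoopA, pvMap_fst_zip, hmin] using h
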